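-- pv_equiv track=rewrite | github.com/BigDog-rgy/Human-Superorganism | combined_viz.py | extract_dataset_json
-- ===== SOURCE A (Python) =====
-- def extract_dataset_json(html: str) -> tuple:
--     nodes_json = "[]"
--     edges_json = "[]"
--     for line in html.splitlines():
--         stripped = line.strip()
--         if stripped.startswith("nodes = new vis.DataSet("):
--             start = stripped.find("[")
--             end   = stripped.rfind("]") + 1
--             if start >= 0 and end > start:
--                 nodes_json = stripped[start:end]
--         elif stripped.startswith("edges = new vis.DataSet("):
--             start = stripped.find("[")
--             end   = stripped.rfind("]") + 1
--             if start >= 0 and end > start: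
--                 edges_json = stripped[start:end]
--     return nodes_json, edges_json
-- ===== SOURCE B (Python) =====
-- def extract_dataset_json(html: str) -> tuple:
--     lines = html.splitlines()
--
--     def grab(prefix):
--         # last successful match in forward order = first in reverse order
--         for line in reversed(lines):
--             s = line.strip()
--             if s.startswith(prefix):
--                 a = s.find("[")
--                 b = s.rfind("]") + 1
--                 if a >= 0 and b > a:
--                     return s[a:b]
--         return "[]"
--
--     return grab("nodes = new vis.DataSet("), grab("edges = new vis.DataSet(")
-- ===== Notes on version B (the rewrite author's own statement) =====
-- stated objective: simpler
-- what changed: Replaces the single interleaved two-state elif loop with one parameterised helper that scans the lines in REVERSE and returns on the first successful match (early exit), called once per prefix.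
import Mathlib
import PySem

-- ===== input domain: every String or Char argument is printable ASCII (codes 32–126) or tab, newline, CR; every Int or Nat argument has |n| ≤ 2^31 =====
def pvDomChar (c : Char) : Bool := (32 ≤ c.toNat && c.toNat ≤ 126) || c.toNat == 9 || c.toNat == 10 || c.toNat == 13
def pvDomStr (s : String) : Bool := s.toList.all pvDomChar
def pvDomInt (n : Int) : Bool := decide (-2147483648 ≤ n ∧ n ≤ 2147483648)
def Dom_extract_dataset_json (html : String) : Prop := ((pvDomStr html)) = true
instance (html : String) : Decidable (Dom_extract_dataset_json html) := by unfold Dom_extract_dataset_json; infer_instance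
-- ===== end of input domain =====

-- B changes the decomposition: one reverse scan with early exit per prefix instead of A's interleaved two-state loop; same cost ("simpler").

-- ===== PORT A =====
def extract_dataset_json (html : String) : String × String :=
  (PySem.Str.splitlines html).foldl
    (fun (acc : String × String) line =>
      let stripped := PySem.Str.strip line
      if PySem.Str.startswith stripped "nodes = new vis.DataSet(" then
        let start := PySem.Str.find stripped "["
        let e := PySem.Str.rfind stripped "]" + 1
        if start ≥ 0 ∧ e > start then (PySem.Str.slice stripped (some start) (some e), acc.2)
        else acc
      else if PySem.Str.startswith stripped "edges = new vis.DataSet(" then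
        let start := PySem.Str.find stripped "["
        let e := PySem.Str.rfind stripped "]" + 1
        if start ≥ 0 ∧ e > start then (acc.1, PySem.Str.slice stripped (some start) (some e))
        else acc
      else acc)
    ("[]", "[]")

-- ===== PORT B =====
-- reverse scan: first line (from the back) whose stripped form matches the prefix and passes the guard
def pvGrab (lines : List String) (pre : String) : String :=
  match lines with
  | [] => "[]"
  | line :: rest =>
    let s := PySem.Str.strip line
    if PySem.Str.startswith s pre then
      let a := PySem.Str.find s "["
      let b := PySem.Str.rfind s "]" + 1
      if a ≥ 0 ∧ b > a then PySem.Str.slice s (some a) (some b)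
      else pvGrab rest pre
    else pvGrab rest pre

def extract_dataset_json_alt (html : String) : String × String :=
  let rev := (PySem.Str.splitlines html).reverse
  (pvGrab rev "nodes = new vis.DataSet(", pvGrab rev "edges = new vis.DataSet(")

-- ===== PRECONDITION & SPEC =====
def Spec_extract_dataset_json (html : String) (out : String × String) : Prop := out = extract_dataset_json_alt html
instance (html : String) (out : String × String) : Decidable (Spec_extract_dataset_json html out) := by unfold Spec_extract_dataset_json; infer_instance

-- ===== CLAIM (what is proved, stated in full; the proofs are below) =====
def Claim_equal_extract_dataset_json : Prop := ∀ (html : String), Dom_extract_dataset_json html → Spec_extract_dataset_json html (extract_dataset_json html)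

-- ===== LEMMAS AND PROOFS =====

-- one-component step of A's loop, for a given prefix
def pvStep (pre : String) (acc : String) (line : String) : String :=
  let s := PySem.Str.strip line
  if PySem.Str.startswith s pre then
    let a := PySem.Str.find s "["
    let b := PySem.Str.rfind s "]" + 1
    if a ≥ 0 ∧ b > a then PySem.Str.slice s (some a) (some b) else acc
  else acc

-- pvGrab with an explicit default
def pvGrabD (lines : List String) (pre : String) (d : String) : String :=
  match lines with
  | [] => d
  | line :: rest =>
    let s := PySem.Str.strip line
    if PySem.Str.startswith s pre then
      let a := PySem.Str.find s "["
      let b := PySem.Str.rfind s "]" + 1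
      if a ≥ 0 ∧ b > a then PySem.Str.slice s (some a) (some b)
      else pvGrabD rest pre d
    else pvGrabD rest pre d

theorem pvGrab_eq_grabD (lines : List String) (pre : String) :
    pvGrab lines pre = pvGrabD lines pre "[]" := by
  induction lines with
  | nil => rfl
  | cons l rest ih => simp [pvGrab, pvGrabD, ih]

theorem pvGrabD_append (xs ys : List String) (pre d : String) :
    pvGrabD (xs ++ ys) pre d = pvGrabD xs pre (pvGrabD ys pre d) := by
  induction xs with
  | nil => rfl
  | cons l rest ih => simp [pvGrabD, ih]

-- a stripped line cannot start with both prefixes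
theorem pv_disjoint (s : String) :
    PySem.Str.startswith s "nodes = new vis.DataSet(" = true →
    PySem.Str.startswith s "edges = new vis.DataSet(" = true → False := by
  intro h1 h2
  rw [PySem.Str.startswith_eq, PySem.Chars.startswith_iff] at h1 h2
  obtain ⟨t1, ht1⟩ := h1
  obtain ⟨t2, ht2⟩ := h2
  have : s.toList[0]? = some 'n' := by rw [← ht1]; rfl
  have h' : s.toList[0]? = some 'e' := by rw [← ht2]; rfl
  simp [this] at h'

-- componentwise fold splits into a pair of folds
theorem pv_foldl_split {α β γ : Type} (f : α → γ → α) (g : β → γ → β)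
    (lines : List γ) (acc : α × β) :
    lines.foldl (fun acc line => (f acc.1 line, g acc.2 line)) acc
      = (lines.foldl f acc.1, lines.foldl g acc.2) := by
  induction lines generalizing acc with
  | nil => rfl
  | cons l rest ih => rw [List.foldl_cons, List.foldl_cons, List.foldl_cons, ih]

-- last update in forward order = first match in reverse order
theorem pv_foldl_eq_grabD (lines : List String) (pre d : String) :
    lines.foldl (pvStep pre) d = pvGrabD lines.reverse pre d := by
  induction lines generalizing d with
  | nil => rfl
  | cons l rest ih =>
    rw [List.foldl_cons, ih, List.reverse_cons, pvGrabD_append,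
      show pvGrabD [l] pre d = pvStep pre d l from by simp [pvStep, pvGrabD]]

-- ===== VERDICT (by name: the statement is the Claim_ definition above) =====
set_option maxHeartbeats 1000000 in
theorem extract_dataset_json_spec : Claim_equal_extract_dataset_json := by
  intro html _
  unfold Spec_extract_dataset_json extract_dataset_json extract_dataset_json_alt
  have hf : (fun (acc : String × String) line =>
        let stripped := PySem.Str.strip line
        if PySem.Str.startswith stripped "nodes = new vis.DataSet(" then
          let start := PySem.Str.find stripped "["
          let e := PySem.Str.rfind stripped "]" + 1
          if start ≥ 0 ∧ e > start then (PySem.Str.slice stripped (some start) (some e), acc.2)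
          else acc
        else if PySem.Str.startswith stripped "edges = new vis.DataSet(" then
          let start := PySem.Str.find stripped "["
          let e := PySem.Str.rfind stripped "]" + 1
          if start ≥ 0 ∧ e > start then (acc.1, PySem.Str.slice stripped (some start) (some e))
          else acc
        else acc)
      = fun (acc : String × String) line =>
          (pvStep "nodes = new vis.DataSet(" acc.1 line,
           pvStep "edges = new vis.DataSet(" acc.2 line) := by
    funext acc line
    by_cases hn : PySem.Str.startswith (PySem.Str.strip line) "nodes = new vis.DataSet(" = true
    · have he : PySem.Str.startswith (PySem.Str.strip line) "edges = new vis.DataSet(" = false := by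
        by_contra h
        exact pv_disjoint _ hn (by simpa using h)
      simp only [pvStep, hn, he, if_true, Bool.false_eq_true, if_false]
      split <;> rfl
    · rw [Bool.not_eq_true] at hn
      simp only [pvStep, hn, Bool.false_eq_true, if_false]
      split <;> [skip; rfl]
      split <;> rfl
  rw [hf, pv_foldl_split]
  simp only [pv_foldl_eq_grabD, pvGrab_eq_grabD]
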